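-- pv_equiv track=rewrite | github.com/tockata/HackBulgaria | exam/cinema.py | order_of_seats
-- ===== SOURCE A (Python) =====
-- def find_row(cinema):
--     min_count = len(cinema[0]) + 1
--     row = 0
--
--     for x in range(0, len(cinema)):
--         empty_seats = 0
--         for y in range(0,  len(cinema[x])):
--             if cinema[x][y] == 0:
--                 empty_seats += 1
--
--         if empty_seats < min_count and empty_seats != 0:
--             min_count = empty_seats
--             row = x + 1
--
--     return row
--
-- def find_col(row, cinema):
--     if 0 in cinema[row]:
--         return cinema[row].index(0) + 1
--     else:
--         return -1
--
-- def order_of_seats(cinema):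
--     result_list = []
--
--     while True:
--         row = find_row(cinema)
--         col = find_col(row - 1, cinema)
--
--         if col != -1:
--             result_list += [(row, col)]
--             cinema[row - 1][col - 1] = 1
--         else:
--             break
--
--     return result_list
-- ===== SOURCE B (Python) =====
-- def order_of_seats(cinema):
--     # Count empty seats per row once; rows are filled in order of fewest
--     # empty seats (ties: lower row index), each row left to right.
--     rows = []
--     for i, row in enumerate(cinema):
--         cnt = row.count(0)
--         if cnt > 0:
--             rows.append((cnt, i, row))
--     rows = sorted(rows, key=lambda t: (t[0], t[1]))
--     result = []
--     for cnt, i, row in rows: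
--         for j, seat in enumerate(row):
--             if seat == 0:
--                 result.append((i + 1, j + 1))
--     return result
-- ===== Notes on version B (the rewrite author's own statement) =====
-- stated objective: faster
-- what changed: B counts the empty seats of each row once, stable-sorts the rows by (count, index) and emits each row's empty columns left to right, replacing A's repeated full-hall rescans (one find_row/find_col pass per seat) by a single counting pass plus one sort.
-- intended difference: On ragged halls where some row has more empty seats than row 0 has seats, A's initial bound len(cinema[0])+1 makes find_row skip such rows and return 0, so A labels seats of the LAST row as row 0 (pairs (0, col)) and can stop with empty seats left; B returns every empty seat with its true 1-based row number, which is the intended order. — e.g. on order_of_seats([[], [0]]): A returns [(0, 1)], B returns [(2, 1)]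
import Mathlib
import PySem

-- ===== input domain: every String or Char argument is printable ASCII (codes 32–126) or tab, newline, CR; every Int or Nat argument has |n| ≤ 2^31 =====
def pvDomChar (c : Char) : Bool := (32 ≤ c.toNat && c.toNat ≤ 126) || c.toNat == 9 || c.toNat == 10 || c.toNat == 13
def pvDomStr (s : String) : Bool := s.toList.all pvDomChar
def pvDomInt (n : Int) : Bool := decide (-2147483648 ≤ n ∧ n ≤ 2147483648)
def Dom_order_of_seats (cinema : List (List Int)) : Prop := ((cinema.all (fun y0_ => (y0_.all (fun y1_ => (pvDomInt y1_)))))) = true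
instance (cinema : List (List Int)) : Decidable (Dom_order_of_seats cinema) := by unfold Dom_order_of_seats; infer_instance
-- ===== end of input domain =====

-- B counts the empty seats of each row once and stable-sorts the rows instead of
-- rescanning the whole hall for every seat (objective: faster on zero-heavy halls).
-- NOTE: Python A fills `cinema` in place (sets chosen seats to 1); B does not mutate
-- its argument — the equivalence proved here is about the RETURN value only.

-- ===== PORT A =====
-- inner loop of find_row: count the zeros of one row
def pvCountEmpty (row : List Int) : Int :=
  row.foldl (fun e v => if v = 0 then e + 1 else e) 0

-- loop body of find_row (the state is (min_count, row))
def pvFrStep (st : Int × Int) (p : Int × List Int) : Int × Int :=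
  if pvCountEmpty p.2 < st.1 ∧ pvCountEmpty p.2 ≠ 0 then (pvCountEmpty p.2, p.1 + 1) else st

def find_row (cinema : List (List Int)) : Int :=
  ((PySem.List.enumerate cinema 0).foldl pvFrStep (((cinema.headD []).length : Int) + 1, 0)).2

def find_col (row : Int) (cinema : List (List Int)) : Int :=
  match PySem.List.pyGet? cinema row with
  | none => -1   -- IndexError in Python; unreachable under Pre_ (row-1 ∈ [-1, len-1])
  | some r =>
    match PySem.List.index? r 0 with   -- `if 0 in cinema[row]: return index+1 else -1`
    | some k => (k : Int) + 1
    | none => -1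

-- cinema[i][j] = 1 with Python's negative-index wraparound; exact where the
-- normalised indices are in range (the only reachable calls under Pre_)
def pvSetSeat (cinema : List (List Int)) (i j : Int) : List (List Int) :=
  let i' := (if i < 0 then i + cinema.length else i).toNat
  let row := cinema.getD i' []
  let j' := (if j < 0 then j + row.length else j).toNat
  cinema.set i' (row.set j' 1)

def pvTotalZeros (cinema : List (List Int)) : Nat :=
  (cinema.map (fun r => PySem.List.count r 0)).sum

-- the `while True` loop; fuel pvTotalZeros+1 is enough because every iteration
-- that continues turns one 0 into 1 (the 0-fuel branch is unreachable)
def pvLoopA : Nat → List (List Int) → List (Int × Int) → List (Int × Int)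
  | 0, _, acc => acc
  | f + 1, cinema, acc =>
    let row := find_row cinema
    let col := find_col (row - 1) cinema
    if col ≠ -1 then
      pvLoopA f (pvSetSeat cinema (row - 1) (col - 1)) (acc ++ [(row, col)])
    else acc

def order_of_seats (cinema : List (List Int)) : List (Int × Int) :=
  pvLoopA (pvTotalZeros cinema + 1) cinema []

-- ===== PORT B =====
def order_of_seats_alt (cinema : List (List Int)) : List (Int × Int) :=
  let rows : List (Int × Int × List Int) :=
    (PySem.List.enumerate cinema 0).foldl
      (fun acc p =>
        if 0 < (PySem.List.count p.2 0 : Int) then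
          acc ++ [(((PySem.List.count p.2 0 : Nat) : Int), p.1, p.2)]
        else acc) []
  let srows := PySem.List.sorted2 rows (fun t => t.1) (fun t => t.2.1)
  srows.foldl
    (fun res t =>
      (PySem.List.enumerate t.2.2 0).foldl
        (fun res q => if q.2 = 0 then res ++ [(t.2.1 + 1, (q.1 : Int) + 1)] else res) res)
    []

-- ===== PRECONDITION & SPEC =====
-- Pre_ excludes only the empty hall, on which A raises IndexError (cinema[0]).
def Pre_order_of_seats (cinema : List (List Int)) : Prop := cinema ≠ []
instance (cinema : List (List Int)) : Decidable (Pre_order_of_seats cinema) := by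
  unfold Pre_order_of_seats; infer_instance

def pvWitness_order_of_seats : List (List Int) := [[0, 1], [1, 0]]

-- On ragged halls where some row has more empty seats than row 0 has seats, A's
-- initial bound len(cinema[0])+1 makes find_row skip such rows and return 0, so A
-- emits seats of the LAST row labelled as row 0 (pairs (0, col)) and can stop with
-- empty seats left; B returns every empty seat with its true 1-based row number,
-- which is the intended order.
def pvCountZ : List Int → Nat
  | [] => 0
  | v :: t => (if v = 0 then 1 else 0) + pvCountZ t

def pvHasBigRow (len0 : Nat) : List (List Int) → Bool
  | [] => false
  | r :: rest => decide (len0 < pvCountZ r) || pvHasBigRow len0 rest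

def D_order_of_seats (cinema : List (List Int)) : Prop :=
  pvHasBigRow (cinema.headD []).length cinema = true
instance (cinema : List (List Int)) : Decidable (D_order_of_seats cinema) := by
  unfold D_order_of_seats; infer_instance

def Spec_order_of_seats (cinema : List (List Int)) (out : List (Int × Int)) : Prop :=
  ¬ D_order_of_seats cinema → out = order_of_seats_alt cinema
instance (cinema : List (List Int)) (out : List (Int × Int)) : Decidable (Spec_order_of_seats cinema out) := by
  unfold Spec_order_of_seats; infer_instance

def pvDiffWitness_order_of_seats : List (List Int) := [[], [0]]
def pvDiffWitnessOut_order_of_seats : (List (Int × Int)) × (List (Int × Int)) :=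
  ([(0, 1)], [(2, 1)])

-- ===== CLAIM (what is proved, stated in full; the proofs are below) =====
def Claim_unchanged_order_of_seats : Prop := ∀ (cinema : List (List Int)), Dom_order_of_seats cinema → Pre_order_of_seats cinema → Spec_order_of_seats cinema (order_of_seats cinema)
def Claim_exact_order_of_seats : Prop := ∀ (cinema : List (List Int)), Dom_order_of_seats cinema → Pre_order_of_seats cinema → D_order_of_seats cinema → order_of_seats cinema ≠ order_of_seats_alt cinema
def Claim_changed_order_of_seats : Prop := Dom_order_of_seats (pvDiffWitness_order_of_seats) ∧ Pre_order_of_seats (pvDiffWitness_order_of_seats) ∧ D_order_of_seats (pvDiffWitness_order_of_seats) ∧ order_of_seats (pvDiffWitness_order_of_seats) = pvDiffWitnessOut_order_of_seats.1 ∧ order_of_seats_alt (pvDiffWitness_order_of_seats) = pvDiffWitnessOut_order_of_seats.2 ∧ pvDiffWitnessOut_order_of_seats.1 ≠ pvDiffWitnessOut_order_of_seats.2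

-- ===== LEMMAS AND PROOFS =====

theorem pvCountZ_eq (r : List Int) : pvCountZ r = PySem.List.count r 0 := by
  induction r with
  | nil => rfl
  | cons v t ih =>
    simp only [pvCountZ, ih, PySem.List.count_eq, List.count_cons]
    by_cases h : v = 0 <;> simp [h] <;> omega

theorem pvHasBigRow_iff (len0 : Nat) (l : List (List Int)) :
    pvHasBigRow len0 l = true ↔ ∃ r ∈ l, len0 < pvCountZ r := by
  induction l with
  | nil => simp [pvHasBigRow]
  | cons r rest ih => simp [pvHasBigRow, ih]

-- the strict lexicographic Bool order sorted2 sorts by, specialised to our triples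
def pvRb (a b : Int × Int × List Int) : Bool :=
  decide (a.1 < b.1) || (!decide (b.1 < a.1) && decide (a.2.1 < b.2.1))

theorem pvRb_iff (a b : Int × Int × List Int) :
    pvRb a b = true ↔ (a.1 < b.1 ∨ (¬ b.1 < a.1 ∧ a.2.1 < b.2.1)) := by
  simp [pvRb]

theorem pvRb_trans {a b c : Int × Int × List Int} (h1 : pvRb a b = true) (h2 : pvRb b c = true) :
    pvRb a c = true := by
  rw [pvRb_iff] at *; omega

theorem pvRb_asymm {a b : Int × Int × List Int} (h1 : pvRb a b = true) (h2 : pvRb b a = true) :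
    False := by
  rw [pvRb_iff] at *; omega

theorem pvRb_total {a b : Int × Int × List Int} (h : a.2.1 ≠ b.2.1) :
    pvRb a b = true ∨ pvRb b a = true := by
  rw [pvRb_iff, pvRb_iff]; omega

-- two pvRb-ordered permutations of each other are equal
theorem pvEq_of_perm_of_pairwise {l1 l2 : List (Int × Int × List Int)}
    (hp : l1.Perm l2) (h1 : l1.Pairwise (fun a b => pvRb a b = true))
    (h2 : l2.Pairwise (fun a b => pvRb a b = true)) : l1 = l2 := by
  induction l1 generalizing l2 with
  | nil => exact (List.Perm.eq_nil hp.symm).symm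
  | cons a t1 ih =>
    cases l2 with
    | nil => exact absurd (List.Perm.eq_nil hp) (by simp)
    | cons b t2 =>
      rcases List.pairwise_cons.mp h1 with ⟨ha1, ht1⟩
      rcases List.pairwise_cons.mp h2 with ⟨hb2, ht2⟩
      by_cases hab : a = b
      · subst hab
        exact congrArg (a :: ·) (ih (hp.cons_inv) ht1 ht2)
      · have ha2 : a ∈ t2 := by
          have := hp.subset (List.mem_cons_self (a := a) (l := t1))
          rcases List.mem_cons.mp this with h | h
          · exact absurd h hab
          · exact h
        have hb1 : b ∈ t1 := by
          have := hp.symm.subset (List.mem_cons_self (a := b) (l := t2))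
          rcases List.mem_cons.mp this with h | h
          · exact absurd h.symm hab
          · exact h
        exact absurd (ha1 b hb1) (fun hx => pvRb_asymm hx (hb2 a ha2) |>.elim)

theorem pvInsertBy_pairwise (x : Int × Int × List Int) (ys : List (Int × Int × List Int))
    (hpw : ys.Pairwise (fun a b => pvRb a b = true))
    (htot : ∀ y ∈ ys, pvRb x y = true ∨ pvRb y x = true) :
    (PySem.List.insertBy pvRb x ys).Pairwise (fun a b => pvRb a b = true) := by
  induction ys with
  | nil => simp [PySem.List.insertBy]
  | cons y ys ih =>
    rcases List.pairwise_cons.mp hpw with ⟨hy, hys⟩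
    by_cases hxy : pvRb x y = true
    · rw [PySem.List.insertBy, if_pos hxy]
      refine List.pairwise_cons.mpr ⟨?_, hpw⟩
      intro z hz
      rcases List.mem_cons.mp hz with rfl | hz
      · exact hxy
      · exact pvRb_trans hxy (hy z hz)
    · rw [PySem.List.insertBy, if_neg hxy]
      refine List.pairwise_cons.mpr ⟨?_, ih hys (fun z hz => htot z (List.mem_cons_of_mem _ hz))⟩
      intro z hz
      rcases (PySem.List.insertBy_mem_iff pvRb x z ys).mp hz with rfl | hz
      · rcases htot y (by simp) with h | h
        · exact absurd h hxy
        · exact h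
      · exact hy z hz

theorem pvFoldl_insertBy_pairwise (xs acc : List (Int × Int × List Int))
    (hnd : ((xs ++ acc).map (fun t => t.2.1)).Nodup)
    (hacc : acc.Pairwise (fun a b => pvRb a b = true)) :
    (xs.foldl (fun acc x => PySem.List.insertBy pvRb x acc) acc).Pairwise
      (fun a b => pvRb a b = true) := by
  induction xs generalizing acc with
  | nil => simpa using hacc
  | cons x xs ih =>
    simp only [List.foldl_cons]
    have hperm : ((xs ++ PySem.List.insertBy pvRb x acc).map (fun t => t.2.1)).Perm
        (((x :: xs) ++ acc).map (fun t => t.2.1)) := by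
      exact List.Perm.map _
        ((List.Perm.append_left xs (PySem.List.insertBy_perm _ _ _)).trans List.perm_middle)
    refine ih (PySem.List.insertBy pvRb x acc) (hperm.nodup_iff.mpr hnd) ?_
    refine pvInsertBy_pairwise x acc hacc ?_
    intro y hy
    apply pvRb_total
    have h1 : x.2.1 ∉ (xs ++ acc).map (fun t => t.2.1) := by
      have hnd' : (x.2.1 :: (xs ++ acc).map (fun t => t.2.1)).Nodup := by
        simpa only [List.cons_append, List.map_cons] using hnd
      exact (List.nodup_cons.mp hnd').1
    intro hkey
    exact h1 (hkey ▸ List.mem_map_of_mem (List.mem_append_right xs hy))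

-- uniqueness: with pairwise-distinct second keys, any pvRb-ordered permutation IS sorted2
theorem pvSorted2_eq (rows ys : List (Int × Int × List Int))
    (hnd : (rows.map (fun t => t.2.1)).Nodup)
    (hperm : ys.Perm rows)
    (hpw : ys.Pairwise (fun a b => pvRb a b = true)) :
    PySem.List.sorted2 rows (fun t => t.1) (fun t => t.2.1) = ys := by
  have hfold : PySem.List.sorted2 rows (fun t => t.1) (fun t => t.2.1) =
      rows.foldl (fun acc x => PySem.List.insertBy pvRb x acc) [] := rfl
  have hpw2 := pvFoldl_insertBy_pairwise rows [] (by simpa using hnd) List.Pairwise.nil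
  have hperm2 : (PySem.List.sorted2 rows (fun t => t.1) (fun t => t.2.1)).Perm rows :=
    PySem.List.sorted2_perm rows _ _ false
  exact pvEq_of_perm_of_pairwise (hperm2.trans hperm.symm) (hfold ▸ hpw2) hpw

-- ===== characterisation of port B =====

def pvAnn (l : List (Int × List Int)) : List (Int × Int × List Int) :=
  (l.filter (fun p => decide (0 < (PySem.List.count p.2 0 : Int)))).map
    (fun p => (((PySem.List.count p.2 0 : Nat) : Int), p.1, p.2))

def pvAnnRows (cinema : List (List Int)) : List (Int × Int × List Int) :=
  pvAnn (PySem.List.enumerate cinema 0)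

def pvEmit (t : Int × Int × List Int) : List (Int × Int) :=
  (((PySem.List.enumerate t.2.2 0).filter (fun q => decide (q.2 = 0))).map
    (fun q => (t.2.1 + 1, q.1 + 1)))

theorem pvAlt_eq (cinema : List (List Int)) :
    order_of_seats_alt cinema =
      (PySem.List.sorted2 (pvAnnRows cinema) (fun t => t.1) (fun t => t.2.1)).flatMap pvEmit := by
  unfold order_of_seats_alt pvAnnRows pvAnn
  rw [PySem.List.foldl_append_ite (p := fun p : Int × List Int => 0 < (PySem.List.count p.2 0 : Int))
      (f := fun p : Int × List Int => (((PySem.List.count p.2 0 : Nat) : Int), p.1, p.2))]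
  rw [List.nil_append]
  rw [PySem.List.foldl_congr_mem _ _ (fun res t => res ++ pvEmit t) _ ?_]
  · rw [PySem.List.foldl_append_eq_flatMap, List.nil_append]
  · intro acc t _
    show _ = acc ++ pvEmit t
    simp only [pvEmit]
    exact PySem.List.foldl_append_ite (p := fun q : Int × Int => q.2 = 0)
      (f := fun q : Int × Int => (t.2.1 + 1, q.1 + 1)) _ acc

-- ===== characterisation of port A's find_row fold =====

theorem pvCountEmpty_eq (row : List Int) :
    pvCountEmpty row = ((PySem.List.count row 0 : Nat) : Int) := by
  rw [pvCountEmpty, PySem.List.foldl_ite_add_one (p := fun v : Int => v = 0),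
    PySem.List.count_eq]
  simp [List.count]
  apply List.countP_congr
  intro v _
  by_cases h : v = 0 <;> simp [h]

theorem pvFR1 (l : List (Int × List Int)) (st : Int × Int) (c : Int)
    (hst : c < st.1)
    (h : ∀ q ∈ l, (PySem.List.count q.2 0 : Int) = 0 ∨ c < (PySem.List.count q.2 0 : Int)) :
    c < (l.foldl pvFrStep st).1 := by
  induction l generalizing st with
  | nil => simpa using hst
  | cons q l ih =>
    simp only [List.foldl_cons]
    refine ih (pvFrStep st q) ?_ (fun p hp => h p (List.mem_cons_of_mem _ hp))
    rw [pvFrStep, pvCountEmpty_eq]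
    split_ifs with hcond
    · rcases h q (by simp) with h0 | hlt
      · exact absurd h0 hcond.2
      · exact hlt
    · exact hst

theorem pvFR2 (l : List (Int × List Int)) (st : Int × Int)
    (h : ∀ q ∈ l, (PySem.List.count q.2 0 : Int) = 0 ∨ st.1 ≤ (PySem.List.count q.2 0 : Int)) :
    l.foldl pvFrStep st = st := by
  induction l generalizing st with
  | nil => rfl
  | cons q l ih =>
    simp only [List.foldl_cons]
    have hstep : pvFrStep st q = st := by
      rw [pvFrStep, pvCountEmpty_eq]
      rcases h q (by simp) with h0 | hle
      · rw [if_neg]; rintro ⟨-, h2⟩; exact h2 h0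
      · rw [if_neg]; rintro ⟨h1, -⟩; omega
    rw [hstep]
    exact ih st (fun p hp => h p (List.mem_cons_of_mem _ hp))

def pvAllLe (cinema : List (List Int)) : Prop :=
  ∀ r ∈ cinema, ((PySem.List.count r 0 : Nat) : Int) ≤ ((cinema.headD []).length : Int)

-- ===== pvAnn utilities =====

theorem pvAnn_append (l1 l2 : List (Int × List Int)) :
    pvAnn (l1 ++ l2) = pvAnn l1 ++ pvAnn l2 := by
  simp [pvAnn]

theorem pvAnn_keys_nodup (l : List (Int × List Int))
    (h : l.Pairwise (fun p q => p.1 < q.1)) :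
    ((pvAnn l).map (fun t => t.2.1)).Nodup := by
  have h2 : (l.filter (fun p => decide (0 < (PySem.List.count p.2 0 : Int)))).Pairwise
      (fun p q => p.1 < q.1) := List.Pairwise.filter _ h
  have heq : ((pvAnn l).map (fun t => t.2.1)) =
      (l.filter (fun p => decide (0 < (PySem.List.count p.2 0 : Int)))).map (fun p => p.1) := by
    simp [pvAnn, Function.comp]
  rw [heq]
  have hpw : ((l.filter (fun p => decide (0 < (PySem.List.count p.2 0 : Int)))).map
      (fun p => p.1)).Pairwise (· < ·) := (List.pairwise_map).mpr (h2.imp (fun hab => hab))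
  exact hpw.imp (fun {a b} (hab : a < b) => ne_of_lt hab)

theorem pvMem_ann (l : List (Int × List Int)) (y : Int × Int × List Int) :
    y ∈ pvAnn l ↔ ∃ p ∈ l, 0 < (PySem.List.count p.2 0 : Int) ∧
      y = (((PySem.List.count p.2 0 : Nat) : Int), p.1, p.2) := by
  simp [pvAnn, eq_comm]
  tauto

theorem pvAnn_key_mem (l : List (Int × List Int)) (y : Int × Int × List Int)
    (hy : y ∈ pvAnn l) : ∃ p ∈ l, y.2.1 = p.1 := by
  rcases (pvMem_ann l y).mp hy with ⟨p, hp, -, rfl⟩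
  exact ⟨p, hp, rfl⟩

-- find_row returns index+1 of the first row attaining the minimal nonzero count
theorem pvFindRow_eq (C1 C2 : List (List Int)) (row : List Int)
    (hall : pvAllLe (C1 ++ row :: C2))
    (hc : 0 < (PySem.List.count row 0 : Int))
    (hmin1 : ∀ q ∈ PySem.List.enumerate C1 0,
      (PySem.List.count q.2 0 : Int) = 0 ∨
        (PySem.List.count row 0 : Int) < (PySem.List.count q.2 0 : Int))
    (hmin2 : ∀ q ∈ PySem.List.enumerate C2 ((C1.length : Int) + 1),
      (PySem.List.count q.2 0 : Int) = 0 ∨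
        (PySem.List.count row 0 : Int) ≤ (PySem.List.count q.2 0 : Int)) :
    find_row (C1 ++ row :: C2) = (C1.length : Int) + 1 := by
  have hrowmem : row ∈ C1 ++ row :: C2 := by simp
  have hcL : (PySem.List.count row 0 : Int) <
      (((C1 ++ row :: C2).headD []).length : Int) + 1 := by
    have := hall row hrowmem
    omega
  rw [find_row, PySem.List.enumerate_append, PySem.List.enumerate_cons, List.foldl_append,
    List.foldl_cons]
  have h1 : (PySem.List.count row 0 : Int) <
      ((PySem.List.enumerate C1 0).foldl pvFrStep
        ((((C1 ++ row :: C2).headD []).length : Int) + 1, 0)).1 :=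
    pvFR1 _ _ _ hcL hmin1
  have hstep : pvFrStep ((PySem.List.enumerate C1 0).foldl pvFrStep
      ((((C1 ++ row :: C2).headD []).length : Int) + 1, 0)) (0 + (C1.length : Int), row) =
      ((PySem.List.count row 0 : Int), (C1.length : Int) + 1) := by
    rw [pvFrStep]
    simp only [pvCountEmpty_eq]
    rw [if_pos ⟨h1, by omega⟩]
    have : (0 : Int) + (C1.length : Int) + 1 = (C1.length : Int) + 1 := by omega
    rw [this]
  rw [hstep]
  have h2 := pvFR2 (PySem.List.enumerate C2 ((C1.length : Int) + 1))
      ((PySem.List.count row 0 : Int), (C1.length : Int) + 1) ?_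
  · have h3 : (0 : Int) + (C1.length : Int) + 1 = (C1.length : Int) + 1 := by omega
    rw [h3, h2]
  · exact hmin2

-- ===== emit and split lemmas =====

theorem pvEmit_filter_nil (pre : List Int) (s : Int) (hpre : (0 : Int) ∉ pre) :
    (PySem.List.enumerate pre s).filter (fun q => decide (q.2 = 0)) = [] := by
  rw [List.filter_eq_nil_iff]
  intro q hq
  rcases (PySem.List.mem_enumerate_iff pre s q).mp hq with ⟨k, hk, rfl⟩
  simp only [decide_eq_true_eq]
  intro h0
  exact hpre (h0 ▸ List.getElem_mem hk)

theorem pvEmit_step (a b i : Int) (pre suf : List Int) (hpre : (0 : Int) ∉ pre) :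
    pvEmit (a, i, pre ++ 0 :: suf) =
      (i + 1, (pre.length : Int) + 1) :: pvEmit (b, i, pre ++ 1 :: suf) := by
  unfold pvEmit
  rw [PySem.List.enumerate_append, PySem.List.enumerate_cons,
    PySem.List.enumerate_append, PySem.List.enumerate_cons,
    List.filter_append, List.filter_append, pvEmit_filter_nil pre 0 hpre]
  simp only [List.filter_cons, decide_eq_true_eq]
  norm_num

theorem pvEmit_last (a i : Int) (pre suf : List Int) (hpre : (0 : Int) ∉ pre)
    (hsuf : (0 : Int) ∉ suf) :
    pvEmit (a, i, pre ++ 0 :: suf) = [(i + 1, (pre.length : Int) + 1)] := by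
  unfold pvEmit
  rw [PySem.List.enumerate_append, PySem.List.enumerate_cons,
    List.filter_append, pvEmit_filter_nil pre 0 hpre]
  simp only [List.filter_cons, decide_eq_true_eq]
  rw [pvEmit_filter_nil suf _ hsuf]
  norm_num

theorem pvAnnRows_split (C1 C2 : List (List Int)) (row : List Int)
    (hc : 0 < (PySem.List.count row 0 : Int)) :
    pvAnnRows (C1 ++ row :: C2) =
      pvAnn (PySem.List.enumerate C1 0) ++
        (((PySem.List.count row 0 : Nat) : Int), (C1.length : Int), row) ::
          pvAnn (PySem.List.enumerate C2 ((C1.length : Int) + 1)) := by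
  unfold pvAnnRows
  rw [PySem.List.enumerate_append, PySem.List.enumerate_cons, pvAnn_append]
  congr 1
  unfold pvAnn
  rw [List.filter_cons]
  simp only [decide_eq_true_eq, if_pos hc, List.map_cons, zero_add]

theorem pvAnnRows_split_done (C1 C2 : List (List Int)) (row : List Int)
    (hc : ¬ 0 < (PySem.List.count row 0 : Int)) :
    pvAnnRows (C1 ++ row :: C2) =
      pvAnn (PySem.List.enumerate C1 0) ++
        pvAnn (PySem.List.enumerate C2 ((C1.length : Int) + 1)) := by
  unfold pvAnnRows
  rw [PySem.List.enumerate_append, PySem.List.enumerate_cons, pvAnn_append]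
  congr 1
  unfold pvAnn
  rw [List.filter_cons]
  simp only [decide_eq_true_eq, if_neg hc, zero_add]

theorem pvAnn_key_range (C : List (List Int)) (s : Int) :
    ∀ y ∈ pvAnn (PySem.List.enumerate C s), s ≤ y.2.1 ∧ y.2.1 < s + (C.length : Int) := by
  intro y hy
  rcases pvAnn_key_mem _ _ hy with ⟨p, hp, hk⟩
  rcases (PySem.List.mem_enumerate_iff C s p).mp hp with ⟨k, hklen, rfl⟩
  simp only [hk]
  omega

-- the head of the sorted row list splits off
theorem pvSorted_cons (A1 A2 : List (Int × Int × List Int)) (m : Int × Int × List Int)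
    (hnd : ((A1 ++ m :: A2).map (fun t => t.2.1)).Nodup)
    (hkey1 : ∀ y ∈ A1, y.2.1 ≠ m.2.1) (hkey2 : ∀ y ∈ A2, y.2.1 ≠ m.2.1)
    (hmin : ∀ y ∈ A1 ++ m :: A2, y ≠ m → pvRb m y = true) :
    PySem.List.sorted2 (A1 ++ m :: A2) (fun t => t.1) (fun t => t.2.1) =
      m :: PySem.List.sorted2 (A1 ++ A2) (fun t => t.1) (fun t => t.2.1) := by
  have hndside : ((A1 ++ A2).map (fun t => t.2.1)).Nodup :=
    List.Nodup.sublist (List.Sublist.map _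
      (List.Sublist.append_left (List.sublist_cons_self _ _) _)) hnd
  apply pvSorted2_eq _ _ hnd
  · exact (List.Perm.cons m (PySem.List.sorted2_perm _ _ _ false)).trans List.perm_middle.symm
  · refine List.pairwise_cons.mpr ⟨?_, ?_⟩
    · intro y hy
      have hyA : y ∈ A1 ++ A2 := (PySem.List.sorted2_perm _ _ _ false).subset hy
      have hyrows : y ∈ A1 ++ m :: A2 := by
        rcases List.mem_append.mp hyA with h | h
        · exact List.mem_append_left _ h
        · exact List.mem_append_right _ (List.mem_cons_of_mem _ h)
      have hym : y ≠ m := by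
        rcases List.mem_append.mp hyA with h | h
        · intro he; exact hkey1 y h (by rw [he])
        · intro he; exact hkey2 y h (by rw [he])
      exact hmin y hyrows hym
    · have hfold : PySem.List.sorted2 (A1 ++ A2) (fun t => t.1) (fun t => t.2.1) =
          (A1 ++ A2).foldl (fun acc x => PySem.List.insertBy pvRb x acc) [] := rfl
      rw [hfold]
      exact pvFoldl_insertBy_pairwise _ [] (by simpa using hndside) List.Pairwise.nil

-- ===== the step, and the main induction =====

theorem pvSet_mid {a : Type} (l1 l2 : List a) (x v : a) :
    (l1 ++ x :: l2).set l1.length v = l1 ++ v :: l2 := by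
  induction l1 with
  | nil => rfl
  | cons h t ih => simpa using ih

theorem pvLoop_base (cinema : List (List Int)) (f : Nat) (acc : List (Int × Int))
    (htz : pvTotalZeros cinema = 0) (hne : cinema ≠ []) :
    pvLoopA (f + 1) cinema acc = acc ++ order_of_seats_alt cinema := by
  have hcz : ∀ r ∈ cinema, PySem.List.count r 0 = 0 := by
    intro r hr
    have hx : PySem.List.count r 0 ∈ cinema.map (fun r => PySem.List.count r 0) :=
      List.mem_map_of_mem hr
    have hle := List.single_le_sum (l := cinema.map (fun r => PySem.List.count r 0))
      (fun x _ => Nat.zero_le x) _ hx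
    rw [pvTotalZeros] at htz
    omega
  have hfr : find_row cinema = 0 := by
    rw [find_row, pvFR2]
    intro q hq
    left
    rcases (PySem.List.mem_enumerate_iff _ _ _).mp hq with ⟨kk, hkk, rfl⟩
    have h := hcz _ (List.getElem_mem hkk)
    rw [PySem.List.count_eq] at h
    simp [h]
  have hidx : PySem.List.index? (cinema.getLast hne) 0 = none := by
    rw [PySem.List.index?_eq_none_iff]
    intro h0
    have := hcz _ (List.getLast_mem hne)
    rw [PySem.List.count_eq] at this
    have := List.count_pos_iff.mpr h0
    omega
  have hfc : find_col ((0 : Int) - 1) cinema = -1 := by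
    rw [find_col]
    have h1 : (0 - 1 : Int) = -1 := by norm_num
    rw [h1, PySem.List.pyGet?_neg_one, List.getLast?_eq_getLast hne]
    simp only [PySem.List.index?_eq_idxOf?] at hidx
    simp [hidx]
  have halt : order_of_seats_alt cinema = [] := by
    rw [pvAlt_eq]
    have hrows : pvAnnRows cinema = [] := by
      unfold pvAnnRows pvAnn
      rw [List.filter_eq_nil_iff.mpr ?_]
      · rfl
      · intro q hq
        rcases (PySem.List.mem_enumerate_iff _ _ _).mp hq with ⟨kk, hkk, rfl⟩
        have h := hcz _ (List.getElem_mem hkk)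
        rw [PySem.List.count_eq] at h
        simp [h]
    rw [hrows]
    rfl
  simp only [pvLoopA, hfr, hfc]
  rw [if_neg (by simp), halt, List.append_nil]

theorem pvLoop_eq (k : Nat) :
    ∀ (cinema : List (List Int)) (fuel : Nat) (acc : List (Int × Int)),
      pvTotalZeros cinema = k → k < fuel → cinema ≠ [] → pvAllLe cinema →
      pvLoopA fuel cinema acc = acc ++ order_of_seats_alt cinema := by
  induction k with
  | zero =>
    intro cinema fuel acc htz hf hne _
    obtain ⟨f, rfl⟩ : ∃ f, fuel = f + 1 := ⟨fuel - 1, by omega⟩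
    exact pvLoop_base cinema f acc htz hne
  | succ k ih =>
    intro cinema fuel acc htz hf hne hall
    obtain ⟨f, rfl⟩ : ∃ f, fuel = f + 1 := ⟨fuel - 1, by omega⟩
    -- the row list is nonempty
    have hndrows : ((pvAnnRows cinema).map (fun t => t.2.1)).Nodup :=
      pvAnn_keys_nodup _ (PySem.List.pairwise_lt_enumerate _ _)
    have hex : ∃ r ∈ cinema, 0 < PySem.List.count r 0 := by
      by_contra hno
      push_neg at hno
      have h0 : pvTotalZeros cinema = 0 := by
        rw [pvTotalZeros]
        refine List.sum_eq_zero ?_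
        intro x hx
        rcases List.mem_map.mp hx with ⟨r, hr, rfl⟩
        have := hno r hr
        omega
      omega
    obtain ⟨r0, hr0mem, hr0pos⟩ := hex
    have hrows_ne : pvAnnRows cinema ≠ [] := by
      rcases List.mem_iff_getElem.mp hr0mem with ⟨ki, hki, hkie⟩
      intro hnil
      have hmemE : ((ki : Int), r0) ∈ PySem.List.enumerate cinema 0 := by
        rw [PySem.List.mem_enumerate_iff]
        exact ⟨ki, hki, by simp [hkie]⟩
      have hmem : ((((PySem.List.count r0 0 : Nat)) : Int), (ki : Int), r0) ∈ pvAnnRows cinema :=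
        (pvMem_ann _ _).mpr ⟨((ki : Int), r0), hmemE, by exact_mod_cast hr0pos, rfl⟩
      rw [hnil] at hmem
      exact absurd hmem (List.not_mem_nil)
    -- the head of the sorted row list
    obtain ⟨m, tl, hsort⟩ : ∃ m tl,
        PySem.List.sorted2 (pvAnnRows cinema) (fun t => t.1) (fun t => t.2.1) = m :: tl := by
      cases h : PySem.List.sorted2 (pvAnnRows cinema) (fun t => t.1) (fun t => t.2.1) with
      | nil =>
        have hperm := PySem.List.sorted2_perm (pvAnnRows cinema)
          (fun t => t.1) (fun t => t.2.1) false
        rw [h] at hperm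
        exact absurd (List.Perm.eq_nil hperm.symm) hrows_ne
      | cons m tl => exact ⟨m, tl, rfl⟩
    have hpwS : (m :: tl).Pairwise (fun a b => pvRb a b = true) := by
      have hfold : PySem.List.sorted2 (pvAnnRows cinema) (fun t => t.1) (fun t => t.2.1) =
          (pvAnnRows cinema).foldl (fun acc x => PySem.List.insertBy pvRb x acc) [] := rfl
      have h := pvFoldl_insertBy_pairwise (pvAnnRows cinema) [] (by simpa using hndrows)
        List.Pairwise.nil
      rw [← hfold, hsort] at h
      exact h
    have hpermS : (m :: tl).Perm (pvAnnRows cinema) :=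
      hsort ▸ PySem.List.sorted2_perm (pvAnnRows cinema) _ _ false
    have hmmem : m ∈ pvAnnRows cinema := hpermS.subset (by simp)
    have hmin : ∀ y ∈ pvAnnRows cinema, y ≠ m → pvRb m y = true := by
      intro y hy hyne
      have hmem2 : y ∈ m :: tl := hpermS.symm.subset hy
      rcases List.mem_cons.mp hmem2 with rfl | hyt
      · exact absurd rfl hyne
      · exact (List.pairwise_cons.mp hpwS).1 y hyt
    -- unpack m
    rcases (pvMem_ann _ _).mp hmmem with ⟨p, hpE, hppos, hmeq⟩
    rcases (PySem.List.mem_enumerate_iff _ _ _).mp hpE with ⟨kidx, hklt, hpeq⟩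
    have hsplit : cinema = cinema.take kidx ++ cinema[kidx] :: cinema.drop (kidx + 1) := by
      rw [List.getElem_cons_drop hklt, List.take_append_drop]
    set C1 := cinema.take kidx with hC1
    set row := cinema[kidx] with hrowdef
    set C2 := cinema.drop (kidx + 1) with hC2
    have hlenC1 : C1.length = kidx := by
      rw [hC1, List.length_take]
      omega
    have hlen' : (C1.length : Int) = (kidx : Int) := by exact_mod_cast congrArg Nat.cast hlenC1
    have hp1 : p.1 = (kidx : Int) := by rw [hpeq]; simp
    have hp2 : p.2 = row := by rw [hpeq]
    have hcpos : 0 < (PySem.List.count row 0 : Int) := by rw [← hp2]; exact hppos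
    have hmval : m = (((PySem.List.count row 0 : Nat) : Int), (kidx : Int), row) := by
      rw [hmeq, hp1, hp2]
    -- the first zero of row
    have h0row : (0 : Int) ∈ row := by
      rw [PySem.List.count_eq] at hcpos
      exact List.count_pos_iff.mp (by exact_mod_cast hcpos)
    obtain ⟨j, hjidx⟩ : ∃ j, PySem.List.index? row 0 = some j := by
      have := (PySem.List.index?_isSome_iff row 0).mpr h0row
      exact Option.isSome_iff_exists.mp this
    obtain ⟨pre, suf, hrow_ps, hprelen, hprenz⟩ := (PySem.List.index?_eq_some_iff row 0 j).mp hjidx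
    subst hprelen
    -- restate m's index with C1.length
    have hmvalL : m = (((PySem.List.count row 0 : Nat) : Int), (C1.length : Int), row) := by
      rw [hmval, ← hlen']
    -- abbreviations for the two side blocks
    set A1 := pvAnn (PySem.List.enumerate C1 0) with hA1
    set A2 := pvAnn (PySem.List.enumerate C2 ((C1.length : Int) + 1)) with hA2
    have hrowseq : pvAnnRows cinema = A1 ++ m :: A2 := by
      conv_lhs => rw [hsplit]
      rw [pvAnnRows_split C1 C2 row hcpos, hmvalL]
    have hminS : ∀ y ∈ A1 ++ m :: A2, y ≠ m → pvRb m y = true := by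
      intro y hy hyne
      exact hmin y (hrowseq ▸ hy) hyne
    -- minimality transported to the enumerate blocks
    have hmin1 : ∀ q ∈ PySem.List.enumerate C1 0,
        (PySem.List.count q.2 0 : Int) = 0 ∨
          (PySem.List.count row 0 : Int) < (PySem.List.count q.2 0 : Int) := by
      intro q hq
      by_cases hq0 : (PySem.List.count q.2 0 : Int) = 0
      · exact Or.inl hq0
      · right
        have hqpos : 0 < (PySem.List.count q.2 0 : Int) := by omega
        have hFq : (((PySem.List.count q.2 0 : Nat) : Int), q.1, q.2) ∈ A1 :=
          (pvMem_ann _ _).mpr ⟨q, hq, hqpos, rfl⟩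
        have hkq : (0 : Int) ≤ q.1 ∧ q.1 < 0 + (C1.length : Int) := pvAnn_key_range C1 0 _ hFq
        have hneq : (((PySem.List.count q.2 0 : Nat) : Int), q.1, q.2) ≠ m := by
          rw [hmvalL]
          intro he
          have h21 : q.1 = (C1.length : Int) := congrArg (fun t : Int × Int × List Int => t.2.1) he
          omega
        have hR := hminS _ (List.mem_append_left _ hFq) hneq
        rw [hmvalL] at hR
        have hR' : (PySem.List.count row 0 : Int) < (PySem.List.count q.2 0 : Int) ∨
            (¬ ((PySem.List.count q.2 0 : Int) < (PySem.List.count row 0 : Int)) ∧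
              (C1.length : Int) < q.1) := (pvRb_iff _ _).mp hR
        omega
    have hmin2 : ∀ q ∈ PySem.List.enumerate C2 ((C1.length : Int) + 1),
        (PySem.List.count q.2 0 : Int) = 0 ∨
          (PySem.List.count row 0 : Int) ≤ (PySem.List.count q.2 0 : Int) := by
      intro q hq
      by_cases hq0 : (PySem.List.count q.2 0 : Int) = 0
      · exact Or.inl hq0
      · right
        have hqpos : 0 < (PySem.List.count q.2 0 : Int) := by omega
        have hFq : (((PySem.List.count q.2 0 : Nat) : Int), q.1, q.2) ∈ A2 :=
          (pvMem_ann _ _).mpr ⟨q, hq, hqpos, rfl⟩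
        have hkq : (C1.length : Int) + 1 ≤ q.1 ∧ q.1 < (C1.length : Int) + 1 + (C2.length : Int) :=
          pvAnn_key_range C2 _ _ hFq
        have hneq : (((PySem.List.count q.2 0 : Nat) : Int), q.1, q.2) ≠ m := by
          rw [hmvalL]
          intro he
          have h21 : q.1 = (C1.length : Int) := congrArg (fun t : Int × Int × List Int => t.2.1) he
          omega
        have hR := hminS _ (List.mem_append_right _ (List.mem_cons_of_mem _ hFq)) hneq
        rw [hmvalL] at hR
        have hR' : (PySem.List.count row 0 : Int) < (PySem.List.count q.2 0 : Int) ∨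
            (¬ ((PySem.List.count q.2 0 : Int) < (PySem.List.count row 0 : Int)) ∧
              (C1.length : Int) < q.1) := (pvRb_iff _ _).mp hR
        omega
    -- find_row and find_col
    have hfr : find_row cinema = (C1.length : Int) + 1 := by
      conv_lhs => rw [hsplit]
      exact pvFindRow_eq C1 C2 row (by rw [← hsplit]; exact hall) hcpos hmin1 hmin2
    have hfc : find_col ((C1.length : Int) + 1 - 1) cinema = (pre.length : Int) + 1 := by
      rw [find_col]
      have h1 : (C1.length : Int) + 1 - 1 = ((kidx : Nat) : Int) := by omega
      rw [h1, PySem.List.pyGet?_natCast, List.getElem?_eq_getElem hklt]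
      show (match PySem.List.index? row 0 with
        | some k => (k : Int) + 1
        | none => -1) = (pre.length : Int) + 1
      rw [hjidx]
    -- the seat update
    have hset : pvSetSeat cinema ((C1.length : Int) + 1 - 1) ((pre.length : Int) + 1 - 1) =
        C1 ++ (pre ++ 1 :: suf) :: C2 := by
      rw [pvSetSeat]
      have h1 : (C1.length : Int) + 1 - 1 = (C1.length : Int) := by omega
      have h2 : (pre.length : Int) + 1 - 1 = (pre.length : Int) := by omega
      rw [h1, h2, if_neg (by omega : ¬ (C1.length : Int) < 0), Int.toNat_natCast]
      have hgetd : cinema.getD C1.length [] = row := by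
        conv_lhs => rw [hsplit]
        rw [List.getD, List.getElem?_append_right (Nat.le_refl _)]
        simp
      rw [hgetd, if_neg (by omega : ¬ (pre.length : Int) < 0), Int.toNat_natCast]
      conv_lhs => rw [hsplit]
      rw [pvSet_mid, hrow_ps, pvSet_mid]
    -- counts of the filled row
    have hpre0 : List.count 0 pre = 0 := List.count_eq_zero.mpr hprenz
    have hcnt_row : PySem.List.count row 0 = PySem.List.count suf 0 + 1 := by
      rw [hrow_ps]
      simp [PySem.List.count_eq, List.count_append, hpre0]
    have hcnt_row' : PySem.List.count (pre ++ 1 :: suf) 0 = PySem.List.count suf 0 := by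
      simp [PySem.List.count_eq, List.count_append, hpre0,
        List.count_cons_of_ne (by norm_num : (1 : Int) ≠ 0)]
    -- totals and invariants for the recursive call
    have htzc : pvTotalZeros cinema =
        pvTotalZeros C1 + PySem.List.count row 0 + pvTotalZeros C2 := by
      conv_lhs => rw [hsplit]
      simp [pvTotalZeros, List.map_append, List.sum_append]
      omega
    have htz' : pvTotalZeros (C1 ++ (pre ++ 1 :: suf) :: C2) = k := by
      have h2 : pvTotalZeros (C1 ++ (pre ++ 1 :: suf) :: C2) =
          pvTotalZeros C1 + PySem.List.count (pre ++ 1 :: suf) 0 + pvTotalZeros C2 := by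
        simp [pvTotalZeros, List.map_append, List.sum_append]
        omega
      omega
    have hne2 : (C1 ++ (pre ++ 1 :: suf) :: C2) ≠ [] := by simp
    have hall' : pvAllLe (C1 ++ (pre ++ 1 :: suf) :: C2) := by
      have hhead : (((C1 ++ (pre ++ 1 :: suf) :: C2).headD []).length : Int) =
          ((cinema.headD []).length : Int) := by
        conv_rhs => rw [hsplit]
        cases C1 with
        | nil => simp [hrow_ps]
        | cons h t => simp
      intro r hr
      rw [hhead]
      rcases List.mem_append.mp hr with h | h
      · exact hall r (by rw [hsplit]; exact List.mem_append_left _ h)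
      · rcases List.mem_cons.mp h with rfl | h
        · have hb := hall row (by rw [hsplit]; simp)
          omega
        · exact hall r (by rw [hsplit]; exact List.mem_append_right _ (List.mem_cons_of_mem _ h))
    -- the sorted row list of cinema splits off m
    have hnd2 : ((A1 ++ m :: A2).map (fun t => t.2.1)).Nodup := by
      rw [← hrowseq]; exact hndrows
    have hkey1 : ∀ y ∈ A1, y.2.1 ≠ m.2.1 := by
      intro y hy
      have hr := pvAnn_key_range C1 0 y hy
      rw [hmvalL]
      show y.2.1 ≠ (C1.length : Int)
      omega
    have hkey2 : ∀ y ∈ A2, y.2.1 ≠ m.2.1 := by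
      intro y hy
      have hr := pvAnn_key_range C2 _ y hy
      rw [hmvalL]
      show y.2.1 ≠ (C1.length : Int)
      omega
    have hsortA : PySem.List.sorted2 (pvAnnRows cinema) (fun t => t.1) (fun t => t.2.1) =
        m :: PySem.List.sorted2 (A1 ++ A2) (fun t => t.1) (fun t => t.2.1) := by
      rw [hrowseq]
      exact pvSorted_cons A1 A2 m hnd2 hkey1 hkey2 hminS
    -- the alt output steps by one seat
    have haltstep : order_of_seats_alt cinema =
        ((C1.length : Int) + 1, (pre.length : Int) + 1) ::
          order_of_seats_alt (C1 ++ (pre ++ 1 :: suf) :: C2) := by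
      by_cases hc1 : 0 < (PySem.List.count (pre ++ 1 :: suf) 0 : Int)
      · -- the row still has empty seats
        have hrowseq' : pvAnnRows (C1 ++ (pre ++ 1 :: suf) :: C2) =
            A1 ++ (((PySem.List.count (pre ++ 1 :: suf) 0 : Nat) : Int), (C1.length : Int),
              pre ++ 1 :: suf) :: A2 := pvAnnRows_split C1 C2 _ hc1
        have hkeymap : ((A1 ++ (((PySem.List.count (pre ++ 1 :: suf) 0 : Nat) : Int),
            (C1.length : Int), pre ++ 1 :: suf) :: A2).map (fun t => t.2.1)) =
            ((A1 ++ m :: A2).map (fun t => t.2.1)) := by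
          rw [hmvalL]
          simp
        have hnd2' := hkeymap ▸ hnd2
        have hm'min : ∀ y ∈ A1 ++ (((PySem.List.count (pre ++ 1 :: suf) 0 : Nat) : Int),
            (C1.length : Int), pre ++ 1 :: suf) :: A2,
            y ≠ (((PySem.List.count (pre ++ 1 :: suf) 0 : Nat) : Int), (C1.length : Int),
              pre ++ 1 :: suf) →
            pvRb (((PySem.List.count (pre ++ 1 :: suf) 0 : Nat) : Int), (C1.length : Int),
              pre ++ 1 :: suf) y = true := by
          intro y hy hyne
          have hyA : y ∈ A1 ++ A2 := by
            rcases List.mem_append.mp hy with h | h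
            · exact List.mem_append_left _ h
            · rcases List.mem_cons.mp h with rfl | h
              · exact absurd rfl hyne
              · exact List.mem_append_right _ h
          have hym : y ≠ m := by
            rcases List.mem_append.mp hyA with h | h
            · intro he; exact hkey1 y h (by rw [he])
            · intro he; exact hkey2 y h (by rw [he])
          have hyrows : y ∈ A1 ++ m :: A2 := by
            rcases List.mem_append.mp hyA with h | h
            · exact List.mem_append_left _ h
            · exact List.mem_append_right _ (List.mem_cons_of_mem _ h)
          have hR := hminS y hyrows hym
          rw [hmvalL] at hR
          have hR' : (PySem.List.count row 0 : Int) < y.1 ∨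
              (¬ (y.1 < (PySem.List.count row 0 : Int)) ∧ (C1.length : Int) < y.2.1) :=
            (pvRb_iff _ _).mp hR
          refine (pvRb_iff _ _).mpr ?_
          left
          show ((PySem.List.count (pre ++ 1 :: suf) 0 : Nat) : Int) < y.1
          omega
        have hsortB : PySem.List.sorted2 (pvAnnRows (C1 ++ (pre ++ 1 :: suf) :: C2))
            (fun t => t.1) (fun t => t.2.1) =
            (((PySem.List.count (pre ++ 1 :: suf) 0 : Nat) : Int), (C1.length : Int),
              pre ++ 1 :: suf) ::
              PySem.List.sorted2 (A1 ++ A2) (fun t => t.1) (fun t => t.2.1) := by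
          rw [hrowseq']
          refine pvSorted_cons A1 A2 _ hnd2' ?_ ?_ hm'min
          · intro y hy
            have hr := pvAnn_key_range C1 0 y hy
            show y.2.1 ≠ (C1.length : Int)
            omega
          · intro y hy
            have hr := pvAnn_key_range C2 _ y hy
            show y.2.1 ≠ (C1.length : Int)
            omega
        rw [pvAlt_eq, pvAlt_eq, hsortA, hsortB]
        simp only [List.flatMap_cons]
        rw [hmvalL, hrow_ps]
        rw [pvEmit_step _ (((PySem.List.count (pre ++ 1 :: suf) 0 : Nat) : Int))
          ((C1.length : Int)) pre suf hprenz]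
        simp
      · -- that was the last empty seat of the row
        have hsuf0 : (0 : Int) ∉ suf := by
          have hz : List.count 0 suf = 0 := by
            rw [← PySem.List.count_eq]
            omega
          exact List.count_eq_zero.mp hz
        have hrowseq' : pvAnnRows (C1 ++ (pre ++ 1 :: suf) :: C2) = A1 ++ A2 :=
          pvAnnRows_split_done C1 C2 _ hc1
        rw [pvAlt_eq, pvAlt_eq, hsortA, hrowseq']
        simp only [List.flatMap_cons]
        rw [hmvalL, hrow_ps, pvEmit_last _ _ pre suf hprenz hsuf0]
        simp
    -- one step of the while loop, then the induction hypothesis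
    simp only [pvLoopA]
    rw [hfr, hfc, if_pos (show ((pre.length : Int) + 1) ≠ -1 by omega), hset]
    rw [ih (C1 ++ (pre ++ 1 :: suf) :: C2) f
      (acc ++ [((C1.length : Int) + 1, (pre.length : Int) + 1)]) htz' (by omega) hne2 hall']
    rw [haltstep]
    simp


-- ===== tightness: A and B differ everywhere inside D_ =====

theorem pvLoopA_prefix (fuel : Nat) : ∀ (cs : List (List Int)) (acc : List (Int × Int)),
    ∃ s, pvLoopA fuel cs acc = acc ++ s := by
  induction fuel with
  | zero => intro cs acc; exact ⟨[], by simp [pvLoopA]⟩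
  | succ f ih =>
    intro cs acc
    simp only [pvLoopA]
    by_cases h : find_col (find_row cs - 1) cs ≠ -1
    · rw [if_pos h]
      obtain ⟨s, hs⟩ := ih (pvSetSeat cs (find_row cs - 1) (find_col (find_row cs - 1) cs - 1))
        (acc ++ [(find_row cs, find_col (find_row cs - 1) cs)])
      exact ⟨(find_row cs, find_col (find_row cs - 1) cs) :: s, by rw [hs]; simp⟩
    · rw [if_neg h]; exact ⟨[], by simp⟩

theorem pvFR3 (l : List (Int × List Int)) : ∀ st : Int × Int,
    l.foldl pvFrStep st = st ∨
      ∃ q ∈ l, l.foldl pvFrStep st = (pvCountEmpty q.2, q.1 + 1) ∧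
        pvCountEmpty q.2 < st.1 ∧ pvCountEmpty q.2 ≠ 0 := by
  induction l with
  | nil => intro st; exact Or.inl rfl
  | cons q l ih =>
    intro st
    simp only [List.foldl_cons]
    rcases ih (pvFrStep st q) with h | ⟨q', hq', hres, hlt, hne⟩
    · rw [h, pvFrStep]
      by_cases hc : pvCountEmpty q.2 < st.1 ∧ pvCountEmpty q.2 ≠ 0
      · exact Or.inr ⟨q, by simp, by rw [if_pos hc], hc.1, hc.2⟩
      · exact Or.inl (by rw [if_neg hc])
    · right
      refine ⟨q', List.mem_cons_of_mem _ hq', hres, ?_, hne⟩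
      rw [pvFrStep] at hlt
      split_ifs at hlt with h2
      · exact lt_trans hlt h2.1
      · exact hlt

theorem pvFindRow_cases (cs : List (List Int)) :
    find_row cs = 0 ∨
      ∃ x : Nat, x < cs.length ∧ find_row cs = (x : Int) + 1 ∧
        (PySem.List.count (cs.getD x []) 0 : Int) ≤ ((cs.headD []).length : Int) ∧
        PySem.List.count (cs.getD x []) 0 ≠ 0 := by
  rw [find_row]
  rcases pvFR3 (PySem.List.enumerate cs 0) (((cs.headD []).length : Int) + 1, 0) with
    h | ⟨q, hq, hres, hlt, hne⟩
  · rw [h]; exact Or.inl rfl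
  · right
    rcases (PySem.List.mem_enumerate_iff _ _ _).mp hq with ⟨x, hx, rfl⟩
    have hlt' : ((PySem.List.count cs[x] 0 : Nat) : Int) < ((cs.headD []).length : Int) + 1 := by
      rw [← pvCountEmpty_eq]; exact hlt
    have hne' : ((PySem.List.count cs[x] 0 : Nat) : Int) ≠ 0 := by
      rw [← pvCountEmpty_eq]; exact hne
    have hgd : cs.getD x [] = cs[x] := by
      rw [List.getD_eq_getElem?_getD, List.getElem?_eq_getElem hx]
      rfl
    refine ⟨x, hx, ?_, ?_, ?_⟩
    · rw [hres]
      show (0 : Int) + (x : Int) + 1 = (x : Int) + 1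
      omega
    · rw [hgd]; omega
    · rw [hgd]; omega

theorem pvSetSeat_length (cs : List (List Int)) (i j : Int) :
    (pvSetSeat cs i j).length = cs.length := by
  simp [pvSetSeat]

theorem pvSetSeat_ne_nil (cs : List (List Int)) (i j : Int) (hne : cs ≠ []) :
    pvSetSeat cs i j ≠ [] := by
  intro h
  have hl := pvSetSeat_length cs i j
  rw [h] at hl
  have : cs.length = 0 := hl.symm
  exact hne (List.eq_nil_of_length_eq_zero this)

theorem pvHeadD_set (cs : List (List Int)) (x : Nat) (v : List Int)
    (hlen : v.length = (cs.getD x []).length) :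
    (((cs.set x v).headD []).length) = ((cs.headD []).length) := by
  cases cs with
  | nil => rfl
  | cons h t =>
    cases x with
    | zero => simpa using hlen
    | succ n => simp [List.set_cons_succ]

theorem pvSetSeat_headD (cs : List (List Int)) (i j : Int) :
    (((pvSetSeat cs i j).headD []).length) = ((cs.headD []).length) := by
  simp only [pvSetSeat]
  apply pvHeadD_set
  simp

theorem pvSetSeat_getD_ne (cs : List (List Int)) (i j : Int) (r : Nat)
    (hne : (if i < 0 then i + cs.length else i).toNat ≠ r) :
    (pvSetSeat cs i j).getD r [] = cs.getD r [] := by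
  simp only [pvSetSeat]
  rw [List.getD_eq_getElem?_getD, List.getElem?_set_ne hne, ← List.getD_eq_getElem?_getD]

theorem pvTZ_le (cs : List (List Int)) (x : Nat) (hx : x < cs.length) :
    PySem.List.count (cs.getD x []) 0 ≤ pvTotalZeros cs := by
  have hgd : cs.getD x [] = cs[x] := by
    rw [List.getD_eq_getElem?_getD, List.getElem?_eq_getElem hx]
    rfl
  rw [hgd, pvTotalZeros]
  exact List.single_le_sum (fun y _ => Nat.zero_le y) _
    (List.mem_map_of_mem (List.getElem_mem hx))

theorem pvTZ_set (cs : List (List Int)) (x : Nat) (hx : x < cs.length) (row' : List Int)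
    (hcnt : PySem.List.count row' 0 + 1 = PySem.List.count (cs.getD x []) 0) :
    pvTotalZeros (cs.set x row') + 1 = pvTotalZeros cs := by
  have hgd : cs.getD x [] = cs[x] := by
    rw [List.getD_eq_getElem?_getD, List.getElem?_eq_getElem hx]
    rfl
  rw [hgd] at hcnt
  rw [List.set_eq_take_append_cons_drop, if_pos hx]
  conv_rhs => rw [← List.take_append_drop x cs, ← List.getElem_cons_drop hx]
  simp only [pvTotalZeros, List.map_append, List.sum_append, List.map_cons, List.sum_cons]
  omega

theorem pvAlt_fst_pos (cs : List (List Int)) :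
    ∀ pr ∈ order_of_seats_alt cs, 1 ≤ pr.1 := by
  intro pr hpr
  rw [pvAlt_eq] at hpr
  rcases List.mem_flatMap.mp hpr with ⟨t, ht, hprt⟩
  have htr : t ∈ pvAnnRows cs := (PySem.List.sorted2_perm _ _ _ false).subset ht
  have hkey := pvAnn_key_range cs 0 t htr
  unfold pvEmit at hprt
  rcases List.mem_map.mp hprt with ⟨q, _, rfl⟩
  have h1 : (0 : Int) ≤ t.2.1 := by omega
  show 1 ≤ t.2.1 + 1
  omega

theorem pvAlt_has_row (cs : List (List Int)) (r : Nat) (hr : r < cs.length)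
    (hcnt : 0 < (PySem.List.count (cs.getD r []) 0 : Int)) :
    ∃ pr ∈ order_of_seats_alt cs, pr.1 = (r : Int) + 1 := by
  have hgd : cs.getD r [] = cs[r] := by
    rw [List.getD_eq_getElem?_getD, List.getElem?_eq_getElem hr]
    rfl
  rw [hgd] at hcnt
  have htrip : (((PySem.List.count cs[r] 0 : Nat) : Int), ((0 : Int) + (r : Int)), cs[r]) ∈
      pvAnnRows cs :=
    (pvMem_ann _ _).mpr ⟨((0 : Int) + (r : Int), cs[r]),
      (PySem.List.mem_enumerate_iff _ _ _).mpr ⟨r, hr, rfl⟩, hcnt, rfl⟩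
  have hsortmem := (PySem.List.sorted2_perm (pvAnnRows cs)
    (fun t => t.1) (fun t => t.2.1) false).symm.subset htrip
  -- a zero inside the row gives an emitted pair
  have h0mem : (0 : Int) ∈ cs[r] := by
    rw [PySem.List.count_eq] at hcnt
    exact List.count_pos_iff.mp (by exact_mod_cast hcnt)
  rcases List.mem_iff_getElem.mp h0mem with ⟨kk, hkk, hkk0⟩
  have hqmem : ((0 : Int) + (kk : Int), cs[r][kk]) ∈ PySem.List.enumerate cs[r] 0 :=
    (PySem.List.mem_enumerate_iff _ _ _).mpr ⟨kk, hkk, rfl⟩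
  refine ⟨((0 : Int) + (r : Int) + 1, ((0 : Int) + (kk : Int)) + 1), ?_, by omega⟩
  rw [pvAlt_eq]
  refine List.mem_flatMap.mpr ⟨_, hsortmem, ?_⟩
  unfold pvEmit
  refine List.mem_map.mpr ⟨((0 : Int) + (kk : Int), cs[r][kk]), ?_, rfl⟩
  refine List.mem_filter.mpr ⟨hqmem, by simp [hkk0]⟩

theorem pvA_avoids_row (r : Nat) : ∀ (fuel : Nat) (cs : List (List Int)) (acc : List (Int × Int)),
    cs ≠ [] → r + 1 < cs.length →
    ((cs.headD []).length : Int) < ((PySem.List.count (cs.getD r []) 0 : Nat) : Int) →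
    ∀ pr ∈ pvLoopA fuel cs acc, pr ∈ acc ∨ pr.1 ≠ (r : Int) + 1 := by
  intro fuel
  induction fuel with
  | zero => intro cs acc _ _ _ pr hpr; exact Or.inl hpr
  | succ f ih =>
    intro cs acc hne hrn hbig pr hpr
    simp only [pvLoopA] at hpr
    by_cases hcol : find_col (find_row cs - 1) cs ≠ -1
    case neg => rw [if_neg hcol] at hpr; exact Or.inl hpr
    rw [if_pos hcol] at hpr
    have hlen0 : 0 < cs.length := List.length_pos_of_ne_nil hne
    have hmain : find_row cs ≠ (r : Int) + 1 ∧
        (if find_row cs - 1 < 0 then find_row cs - 1 + (cs.length : Int)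
          else find_row cs - 1).toNat ≠ r := by
      rcases pvFindRow_cases cs with h0 | ⟨x, hx, hxe, hxle, hxne⟩
      · rw [h0]
        refine ⟨by omega, ?_⟩
        rw [if_pos (by omega)]
        omega
      · rw [hxe]
        have hxr : x ≠ r := by
          intro he
          subst he
          omega
        refine ⟨by omega, ?_⟩
        rw [if_neg (by omega)]
        omega
    set cs' := pvSetSeat cs (find_row cs - 1) (find_col (find_row cs - 1) cs - 1) with hcs'
    have hne' : cs' ≠ [] := pvSetSeat_ne_nil _ _ _ hne
    have hlen' : r + 1 < cs'.length := by rw [hcs', pvSetSeat_length]; exact hrn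
    have hgd' : cs'.getD r [] = cs.getD r [] := pvSetSeat_getD_ne _ _ _ r hmain.2
    have hh : ((cs'.headD []).length) = ((cs.headD []).length) := by
      rw [hcs']; exact pvSetSeat_headD _ _ _
    have hbig' : ((cs'.headD []).length : Int) <
        ((PySem.List.count (cs'.getD r []) 0 : Nat) : Int) := by
      rw [hgd', hh]; exact hbig
    rcases ih cs' (acc ++ [(find_row cs, find_col (find_row cs - 1) cs)]) hne' hlen' hbig'
        pr hpr with hm | hm
    · rcases List.mem_append.mp hm with h | h
      · exact Or.inl h
      · right
        have hpr2 : pr = (find_row cs, find_col (find_row cs - 1) cs) := by simpa using h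
        rw [hpr2]
        exact hmain.1
    · exact Or.inr hm

theorem pvA_hits_zero (k : Nat) : ∀ (cs : List (List Int)) (fuel : Nat) (acc : List (Int × Int)),
    pvTotalZeros cs = k → k < fuel → cs ≠ [] →
    ((cs.headD []).length : Int) < ((PySem.List.count (cs.getD (cs.length - 1) []) 0 : Nat) : Int) →
    ∃ pr ∈ pvLoopA fuel cs acc, pr.1 = 0 := by
  induction k with
  | zero =>
    intro cs fuel acc htz _ hne hbig
    exfalso
    have hn1 : cs.length - 1 < cs.length := by
      have := List.length_pos_of_ne_nil hne; omega
    have := pvTZ_le cs (cs.length - 1) hn1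
    omega
  | succ k ih =>
    intro cs fuel acc htz hf hne hbig
    obtain ⟨f, rfl⟩ : ∃ f, fuel = f + 1 := ⟨fuel - 1, by omega⟩
    have hn1 : cs.length - 1 < cs.length := by
      have := List.length_pos_of_ne_nil hne; omega
    have hgdl : cs.getD (cs.length - 1) [] = cs.getLast hne := by
      rw [List.getLast_eq_getElem, List.getD_eq_getElem?_getD, List.getElem?_eq_getElem hn1]
      rfl
    rcases pvFindRow_cases cs with h0 | ⟨x, hx, hxe, hxle, hxne⟩
    · -- no selectable row: the loop works on the LAST row, emitting a (0, col) pair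
      have hmem0 : (0 : Int) ∈ cs.getD (cs.length - 1) [] := by
        refine List.count_pos_iff.mp ?_
        have hb2 := hbig
        rw [PySem.List.count_eq] at hb2
        omega
      obtain ⟨j, hj⟩ : ∃ j, PySem.List.index? (cs.getD (cs.length - 1) []) 0 = some j :=
        Option.isSome_iff_exists.mp ((PySem.List.index?_isSome_iff _ _).mpr hmem0)
      have hfc : find_col ((0 : Int) - 1) cs = (j : Int) + 1 := by
        rw [find_col]
        have h1 : (0 - 1 : Int) = -1 := by norm_num
        rw [h1, PySem.List.pyGet?_neg_one, List.getLast?_eq_getLast hne]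
        show (match PySem.List.index? (cs.getLast hne) 0 with
          | some k => (k : Int) + 1
          | none => -1) = (j : Int) + 1
        rw [← hgdl, hj]
      simp only [pvLoopA, h0, hfc]
      rw [if_pos (by omega : ((j : Int) + 1) ≠ -1)]
      obtain ⟨s, hs⟩ := pvLoopA_prefix f (pvSetSeat cs (0 - 1) ((j : Int) + 1 - 1))
        (acc ++ [(0, (j : Int) + 1)])
      rw [hs]
      exact ⟨(0, (j : Int) + 1), by simp, rfl⟩
    · -- a selectable row is filled by one seat; recurse
      have hxr : x ≠ cs.length - 1 := by
        intro he
        subst he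
        omega
      have hgdx : cs.getD x [] = cs[x] := by
        rw [List.getD_eq_getElem?_getD, List.getElem?_eq_getElem hx]
        rfl
      have hmemx : (0 : Int) ∈ cs.getD x [] := by
        refine List.count_pos_iff.mp ?_
        have hb2 := hxne
        rw [PySem.List.count_eq] at hb2
        omega
      obtain ⟨j, hj⟩ : ∃ j, PySem.List.index? (cs.getD x []) 0 = some j :=
        Option.isSome_iff_exists.mp ((PySem.List.index?_isSome_iff _ _).mpr hmemx)
      have hfc : find_col ((x : Int) + 1 - 1) cs = (j : Int) + 1 := by
        rw [find_col]
        have h1 : (x : Int) + 1 - 1 = ((x : Nat) : Int) := by omega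
        rw [h1, PySem.List.pyGet?_natCast, List.getElem?_eq_getElem hx]
        show (match PySem.List.index? cs[x] 0 with
          | some k => (k : Int) + 1
          | none => -1) = (j : Int) + 1
        have hj' : PySem.List.index? cs[x] 0 = some j := by rw [← hgdx]; exact hj
        rw [hj']
      have hsetstep : pvSetSeat cs ((x : Int) + 1 - 1) ((j : Int) + 1 - 1) =
          cs.set x ((cs.getD x []).set j 1) := by
        simp only [pvSetSeat]
        have h1 : (x : Int) + 1 - 1 = ((x : Nat) : Int) := by omega
        have h2 : (j : Int) + 1 - 1 = ((j : Nat) : Int) := by omega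
        rw [h1, h2, if_neg (by omega : ¬ ((x : Nat) : Int) < 0), Int.toNat_natCast,
          if_neg (by omega : ¬ ((j : Nat) : Int) < 0), Int.toNat_natCast]
      obtain ⟨pre, suf, hps, hplen, hpz⟩ := (PySem.List.index?_eq_some_iff _ _ _).mp hj
      have hdec : PySem.List.count ((cs.getD x []).set j 1) 0 + 1 =
          PySem.List.count (cs.getD x []) 0 := by
        rw [hps, ← hplen, pvSet_mid]
        rw [PySem.List.count_eq, PySem.List.count_eq]
        simp [List.count_append, List.count_eq_zero.mpr hpz,
          List.count_cons_of_ne (by norm_num : (1 : Int) ≠ 0)]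
      have htz' : pvTotalZeros (cs.set x ((cs.getD x []).set j 1)) = k := by
        have := pvTZ_set cs x hx _ hdec
        omega
      have hne2 : cs.set x ((cs.getD x []).set j 1) ≠ [] := by
        intro h
        have hl : (cs.set x ((cs.getD x []).set j 1)).length = cs.length := List.length_set
        rw [h] at hl
        exact hne (List.eq_nil_of_length_eq_zero hl.symm)
      have hhead' : (((cs.set x ((cs.getD x []).set j 1)).headD []).length) =
          ((cs.headD []).length) :=
        pvHeadD_set cs x _ List.length_set
      have hlast' : (cs.set x ((cs.getD x []).set j 1)).getD
          ((cs.set x ((cs.getD x []).set j 1)).length - 1) [] =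
          cs.getD (cs.length - 1) [] := by
        rw [List.length_set (as := cs)]
        rw [List.getD_eq_getElem?_getD, List.getElem?_set_ne (by omega : x ≠ cs.length - 1),
          ← List.getD_eq_getElem?_getD]
      obtain ⟨pr, hpr, hpr0⟩ := ih (cs.set x ((cs.getD x []).set j 1)) f
        (acc ++ [((x : Int) + 1, (j : Int) + 1)]) htz' (by omega) hne2
        (by rw [hhead', hlast']; exact hbig)
      refine ⟨pr, ?_, hpr0⟩
      simp only [pvLoopA, hxe, hfc]
      rw [if_pos (by omega : ((j : Int) + 1) ≠ -1), hsetstep]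
      exact hpr

-- ===== VERDICT (by name: the statement is the Claim_ definition above) =====
theorem order_of_seats_spec : Claim_unchanged_order_of_seats := by
  intro cinema _ hpre
  intro hnd
  have hall : pvAllLe cinema := by
    intro r hr
    by_contra hlt
    apply hnd
    unfold D_order_of_seats
    rw [pvHasBigRow_iff]
    refine ⟨r, hr, ?_⟩
    rw [pvCountZ_eq]
    omega
  exact pvLoop_eq (pvTotalZeros cinema) cinema (pvTotalZeros cinema + 1) [] rfl
    (Nat.lt_succ_self _) hpre hall

theorem order_of_seats_changed : Claim_changed_order_of_seats := by
  unfold Claim_changed_order_of_seats; decide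

theorem order_of_seats_tight : Claim_exact_order_of_seats := by
  unfold Claim_exact_order_of_seats
  intro cinema _ hpre hd
  unfold D_order_of_seats at hd
  rw [pvHasBigRow_iff] at hd
  obtain ⟨r0, hr0, hbig0⟩ := hd
  rw [pvCountZ_eq] at hbig0
  intro heq
  by_cases hcase : ∃ x : Nat, x + 1 < cinema.length ∧
      ((cinema.headD []).length : Int) < ((PySem.List.count (cinema.getD x []) 0 : Nat) : Int)
  · -- a big row that is not the last row: A never emits its row number, B does
    obtain ⟨x, hxn, hxbig⟩ := hcase
    obtain ⟨pr, hprB, hprfst⟩ := pvAlt_has_row cinema x (by omega) (by omega)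
    have hprA : pr ∈ pvLoopA (pvTotalZeros cinema + 1) cinema [] := by
      have : pr ∈ order_of_seats cinema := heq ▸ hprB
      exact this
    rcases pvA_avoids_row x (pvTotalZeros cinema + 1) cinema [] hpre hxn hxbig pr hprA with
      h | h
    · exact absurd h (List.not_mem_nil)
    · exact h hprfst
  · -- the big row is the last row: A emits a (0, col) pair, B never does
    push_neg at hcase
    rcases List.mem_iff_getElem.mp hr0 with ⟨ri, hri, hrie⟩
    have hgd : cinema.getD ri [] = r0 := by
      rw [List.getD_eq_getElem?_getD, List.getElem?_eq_getElem hri, hrie]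
      rfl
    have hlastidx : ri = cinema.length - 1 := by
      by_contra hne2
      have hcb := hcase ri (by omega)
      rw [hgd] at hcb
      omega
    have hlastbig : ((cinema.headD []).length : Int) <
        ((PySem.List.count (cinema.getD (cinema.length - 1) []) 0 : Nat) : Int) := by
      rw [← hlastidx, hgd]
      exact_mod_cast by omega
    obtain ⟨pr, hprA, hpr0⟩ := pvA_hits_zero (pvTotalZeros cinema) cinema
      (pvTotalZeros cinema + 1) [] rfl (Nat.lt_succ_self _) hpre hlastbig
    have hprB : pr ∈ order_of_seats_alt cinema := heq ▸ hprA
    have := pvAlt_fst_pos cinema pr hprB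
    omega
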